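-- pv_equiv track=rewrite | github.com/dattt19uit/OpenABC | datagen/experimental/generate_nl_logic_dataset.py | _encoder_expr
-- ===== SOURCE A (Python) =====
-- from typing import Dict, List, Tuple, Optional
--
-- def _encoder_expr(inputs: List[str], out_width: int) -> List[str]:
--     outputs = []
--     for bit in range(out_width):
--         terms = []
--         for i, inp in enumerate(inputs):
--             if (i >> bit) & 1:
--                 terms.append(inp)
--         outputs.append(" | ".join(terms) if terms else "0")
--     return outputs
-- ===== SOURCE B (Python) =====
-- def _encoder_expr(inputs, out_width):
--     # Scatter: one pass over inputs distributing each into the accumulator of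
--     # every bit position set in its index; bits at or above the bit length of
--     # the largest index are never set, so only that many accumulators exist
--     # and the remaining output bits are padded with "0".
--     nbits = max(len(inputs) - 1, 0).bit_length()
--     acc = [[] for _ in range(min(out_width, nbits))]
--     for i, inp in enumerate(inputs):
--         x = i
--         for t in acc:
--             if x == 0:
--                 break
--             if x & 1:
--                 t.append(inp)
--             x >>= 1
--     return [" | ".join(t) if t else "0" for t in acc] + ["0"] * (out_width - len(acc))
-- ===== Notes on version B (the rewrite author's own statement) =====
-- stated objective: alternative
-- what changed: A gathers terms per output bit by rescanning all inputs for every bit; B makes one pass over the inputs, scattering each input into a per-bit accumulator for the set bits of its index (only bit_length(len-1) accumulators exist), then joins the accumulators and pads the remaining bits with "0".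
import Mathlib
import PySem

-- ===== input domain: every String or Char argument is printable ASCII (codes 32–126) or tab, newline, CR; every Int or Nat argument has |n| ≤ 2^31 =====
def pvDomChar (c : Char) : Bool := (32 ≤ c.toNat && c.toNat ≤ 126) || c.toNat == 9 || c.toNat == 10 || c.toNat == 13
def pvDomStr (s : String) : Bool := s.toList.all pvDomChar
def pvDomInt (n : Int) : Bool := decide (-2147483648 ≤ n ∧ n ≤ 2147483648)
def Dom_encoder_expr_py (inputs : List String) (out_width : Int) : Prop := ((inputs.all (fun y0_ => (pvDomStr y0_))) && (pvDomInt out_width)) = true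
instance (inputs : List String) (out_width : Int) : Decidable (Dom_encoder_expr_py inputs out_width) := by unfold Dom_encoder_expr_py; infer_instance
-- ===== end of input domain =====

-- B replaces A's per-bit gather (a scan of all inputs for every output bit) by one pass
-- over the inputs that scatters each input into the accumulators of its index's set bits
-- (objective: alternative decomposition; also skips the bits above the index's highest set bit).

-- ===== PORT A =====
-- '(i >> bit) & 1': i and bit are both nonnegative here, so Nat shift/and via .toNat is exact.
def encoder_expr_py (inputs : List String) (out_width : Int) : List String :=
  (PySem.List.pyRange 0 out_width 1).foldl (fun outputs bit =>
    let terms := (PySem.List.enumerate inputs).foldl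
      (fun terms p => if (p.1.toNat >>> bit.toNat) &&& 1 == 1 then terms ++ [p.2] else terms) []
    outputs ++ [if terms = [] then "0" else PySem.Str.join " | " terms]) []

-- ===== PORT B =====
-- inner 'for t in acc' loop of Source B: walks the accumulator list, consuming x bit by bit
-- (Lean rebuilds the list where Python mutates the sublists in place; same values).
def pvScatter (inp : String) : Nat → List (List String) → List (List String)
  | _, [] => []
  | x, t :: ts =>
    if x = 0 then t :: ts
    else (if x &&& 1 == 1 then t ++ [inp] else t) :: pvScatter inp (x >>> 1) ts

-- 'max(len(inputs)-1, 0).bit_length()' is Nat.size of the truncated subtraction;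
-- 'min(out_width, nbits)' with the range(...) clamp of a negative bound is 'min out_width.toNat nbits'.
def encoder_expr_py_alt (inputs : List String) (out_width : Int) : List String :=
  let nbits : Nat := Nat.size (inputs.length - 1)
  let acc0 : List (List String) := List.replicate (min out_width.toNat nbits) []
  let acc := (PySem.List.enumerate inputs).foldl (fun acc p => pvScatter p.2 p.1.toNat acc) acc0
  acc.map (fun t => if t = [] then "0" else PySem.Str.join " | " t)
    ++ List.replicate (out_width - (acc.length : Int)).toNat "0"

-- ===== PRECONDITION & SPEC =====
def Spec_encoder_expr_py (inputs : List String) (out_width : Int) (out : List String) : Prop := out = encoder_expr_py_alt inputs out_width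
instance (inputs : List String) (out_width : Int) (out : List String) : Decidable (Spec_encoder_expr_py inputs out_width out) := by unfold Spec_encoder_expr_py; infer_instance

-- ===== CLAIM (what is proved, stated in full; the proofs are below) =====
def Claim_equal_encoder_expr_py : Prop := ∀ (inputs : List String) (out_width : Int), Dom_encoder_expr_py inputs out_width → Spec_encoder_expr_py inputs out_width (encoder_expr_py inputs out_width)

-- ===== LEMMAS AND PROOFS =====

-- the bit test both programs perform, and the per-bit term list of a pair list
def pvC (x b : Nat) : Bool := (x >>> b) &&& 1 == 1

def pvT (l : List (Int × String)) (b : Nat) : List String :=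
  (l.filter (fun p => pvC p.1.toNat b)).map Prod.snd

theorem pvC_zero (b : Nat) : pvC 0 b = false := by simp [pvC]

theorem pvC_succ (x b : Nat) : pvC x (b + 1) = pvC (x >>> 1) b := by
  rw [pvC, pvC, show b + 1 = 1 + b from Nat.add_comm b 1, Nat.shiftRight_add]

theorem pvScatter_map_range (inp : String) :
    ∀ (w : ℕ) (x : ℕ) (c : ℕ → List String),
      pvScatter inp x ((List.range w).map c)
        = (List.range w).map (fun b => if pvC x b then c b ++ [inp] else c b) := by
  intro w
  induction w with
  | zero => intro x c; simp [pvScatter]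
  | succ w ih =>
    intro x c
    rw [List.range_succ_eq_map]
    simp only [List.map_cons, List.map_map]
    by_cases hx : x = 0
    · subst hx
      simp [pvScatter, pvC_zero]
    · rw [pvScatter]
      simp only [if_neg hx, Function.comp_def]
      rw [ih (x >>> 1) (fun b => c (b + 1))]
      congr 1
      apply List.map_congr_left
      intro b _
      simp only [Nat.succ_eq_add_one, pvC_succ]

theorem pvFold_invariant (w : ℕ) :
    ∀ (l : List (Int × String)) (c : ℕ → List String),
      l.foldl (fun acc p => pvScatter p.2 p.1.toNat acc) ((List.range w).map c)
        = (List.range w).map (fun b => c b ++ pvT l b) := by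
  intro l
  induction l with
  | nil => intro c; simp [pvT]
  | cons p l ih =>
    intro c
    simp only [List.foldl_cons]
    rw [pvScatter_map_range, ih]
    apply List.map_congr_left
    intro b _
    by_cases h : pvC p.1.toNat b <;> simp [pvT, h]

-- A's inner gather over any pair list equals pvT (generalized accumulator)
theorem pvA_terms (bit : ℕ) (l : List (Int × String)) (acc : List String) :
    l.foldl (fun terms p => if (p.1.toNat >>> bit) &&& 1 == 1 then terms ++ [p.2] else terms) acc
      = acc ++ pvT l bit := by
  induction l generalizing acc with
  | nil => simp [pvT]
  | cons p l ih =>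
    simp only [List.foldl_cons, pvT, List.filter_cons, pvC] at ih ⊢
    by_cases h : ((p.1.toNat >>> bit) &&& 1 == 1) = true
    · rw [if_pos h, if_pos h, ih]
      simp
    · rw [if_neg h, if_neg h, ih]

-- bits at or above the bit length of the largest index collect no terms
theorem pvT_high (inputs : List String) (b : ℕ)
    (hb : Nat.size (inputs.length - 1) ≤ b) :
    pvT (PySem.List.enumerate inputs) b = [] := by
  unfold pvT
  rw [List.map_eq_nil_iff, List.filter_eq_nil_iff]
  intro p hp
  rcases (PySem.List.mem_enumerate_iff _ _ _).1 hp with ⟨k, hk, rfl⟩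
  have hk2 : k < 2 ^ b := by
    calc k < inputs.length := hk
      _ ≤ 2 ^ Nat.size (inputs.length - 1) := by
          have := Nat.lt_size_self (inputs.length - 1)
          omega
      _ ≤ 2 ^ b := Nat.pow_le_pow_right (by norm_num) hb
  have hz : k >>> b = 0 := by
    rw [Nat.shiftRight_eq_div_pow]
    simp [Nat.div_eq_of_lt, hk2]
  simp [pvC, hz]

-- a map over range w whose tail [m, w) is constantly "0" splits into map ++ replicate
theorem pvRangeSplit (f : ℕ → String) (w m : ℕ) (hm : m ≤ w)
    (h0 : ∀ b, m ≤ b → b < w → f b = "0") :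
    (List.range w).map f = (List.range m).map f ++ List.replicate (w - m) "0" := by
  conv_lhs => rw [show w = m + (w - m) by omega, List.range_add]
  rw [List.map_append, List.map_map]
  congr 1
  rw [show List.replicate (w - m) "0" = (List.range (w - m)).map (fun _ => "0") by
      simp [List.map_const']]
  apply List.map_congr_left
  intro j hj
  rw [List.mem_range] at hj
  exact h0 (m + j) (Nat.le_add_right m j) (by omega)

-- ===== VERDICT (by name: the statement is the Claim_ definition above) =====
theorem encoder_expr_py_spec : Claim_equal_encoder_expr_py := by
  intro inputs out_width _
  unfold Spec_encoder_expr_py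
  simp only [encoder_expr_py, encoder_expr_py_alt]
  rw [show (List.replicate (min out_width.toNat (Nat.size (inputs.length - 1))) ([] : List String))
        = (List.range (min out_width.toNat (Nat.size (inputs.length - 1)))).map (fun _ => []) by
        simp [List.map_const']]
  rw [pvFold_invariant]
  simp only [pvA_terms, List.nil_append]
  rw [PySem.List.foldl_append_singleton_eq_map]
  simp only [List.nil_append, PySem.List.pyRange_one, Int.sub_zero, List.map_map,
    List.length_map, List.length_range]
  have hmw : min out_width.toNat (Nat.size (inputs.length - 1)) ≤ out_width.toNat :=
    Nat.min_le_left _ _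
  rw [show (out_width - ((min out_width.toNat (Nat.size (inputs.length - 1)) : ℕ) : Int)).toNat
        = out_width.toNat - min out_width.toNat (Nat.size (inputs.length - 1)) by omega]
  have hA : ((fun bit : Int => if pvT (PySem.List.enumerate inputs) bit.toNat = [] then "0"
        else PySem.Str.join " | " (pvT (PySem.List.enumerate inputs) bit.toNat))
      ∘ fun k : ℕ => 0 + (k : Int))
      = fun b : ℕ => if pvT (PySem.List.enumerate inputs) b = [] then "0"
        else PySem.Str.join " | " (pvT (PySem.List.enumerate inputs) b) := by
    funext b
    simp [Function.comp]
  have hB : ((fun t => if t = [] then "0" else PySem.Str.join " | " t)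
      ∘ fun b : ℕ => pvT (PySem.List.enumerate inputs) b)
      = fun b : ℕ => if pvT (PySem.List.enumerate inputs) b = [] then "0"
        else PySem.Str.join " | " (pvT (PySem.List.enumerate inputs) b) := by
    funext b
    rfl
  rw [hA, hB]
  rw [pvRangeSplit _ _ _ hmw]
  intro b hmb hbw
  have hn : Nat.size (inputs.length - 1) ≤ b := by omega
  rw [pvT_high inputs b hn]
  simp
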